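-- pv_equiv track=rewrite | github.com/tteduits/DA-ASC | DataFunctions/text_functions.py | add_spaces_after_period
-- ===== SOURCE A (Python) =====
-- def add_spaces_after_period(text):
--     """
--     Add spaces after periods where needed in the text.
--     """
--     corrected_text = ""
--     for i, char in enumerate(text):
--         if char == ".":
--             if i + 1 < len(text) and (i == len(text) - 1 or text[i + 1] != " ") and (
--                     i + 1 == len(text) or not text[i + 1].isdigit()):
--                 corrected_text += char + " "
--             else:
--                 corrected_text += char
--         else:
--             corrected_text += char
--     return corrected_text
-- ===== SOURCE B (Python) =====
-- def add_spaces_after_period(text):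
--     """
--     Add spaces after periods where needed in the text.
--     Segment-based: split the text on periods, then reconstruct each period, adding a
--     space when the character following it exists and is neither ' ' nor a digit.
--     """
--     parts = text.split('.')
--     pieces = [parts[0]]
--     last = len(parts) - 1
--     for k in range(1, len(parts)):
--         part = parts[k]
--         nxt = part[0] if part else ('.' if k < last else None)
--         if nxt is not None and nxt != ' ' and not nxt.isdigit():
--             pieces.append('. ' + part)
--         else:
--             pieces.append('.' + part)
--     return ''.join(pieces)
-- ===== Notes on version B (the rewrite author's own statement) =====
-- stated objective: alternative
-- what changed: Replaced A's per-character scan with index lookahead by a split-on-period segment reconstruction: the text is split on periods once and each period is re-emitted with or without a trailing space depending on the first character of the following segment, joining the pieces at the end instead of repeated string concatenation.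
import Mathlib
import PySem

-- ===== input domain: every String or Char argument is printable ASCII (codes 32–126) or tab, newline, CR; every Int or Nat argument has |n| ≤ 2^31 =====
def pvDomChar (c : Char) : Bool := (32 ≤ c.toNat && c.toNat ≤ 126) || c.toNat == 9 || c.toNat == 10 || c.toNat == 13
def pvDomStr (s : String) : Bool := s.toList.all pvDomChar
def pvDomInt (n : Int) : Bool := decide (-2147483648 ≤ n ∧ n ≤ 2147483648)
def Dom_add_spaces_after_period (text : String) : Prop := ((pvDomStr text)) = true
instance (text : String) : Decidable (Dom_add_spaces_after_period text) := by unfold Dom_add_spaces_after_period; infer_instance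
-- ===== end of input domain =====

-- per-character scan with index lookahead; objective: alternative decomposition, same result.

-- ===== PORT A =====
-- loop body of A: for i, char in enumerate(text); string '+=' becomes list '++', String.mk at the end.
-- text[i+1] is PySem.List.pyGet?; the '.any isdigit' / '≠ some' readings of the guarded lookups are
-- only reached when i+1 < len(text) (the first conjunct), exactly as Python short-circuits.
def pvABody (chars : List Char) (acc : List Char) (p : Int × Char) : List Char :=
  let i := p.1
  let char := p.2
  if char = '.' then
    if (i + 1 < (chars.length : Int)) ∧
       (i = (chars.length : Int) - 1 ∨ PySem.List.pyGet? chars (i + 1) ≠ some ' ') ∧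
       (i + 1 = (chars.length : Int) ∨ ¬ ((PySem.List.pyGet? chars (i + 1)).any PySem.Chars.isdigit = true)) then
      acc ++ [char, ' ']
    else
      acc ++ [char]
  else
    acc ++ [char]

def add_spaces_after_period (text : String) : String :=
  String.mk ((PySem.List.enumerate text.toList).foldl (pvABody text.toList) [])

-- ===== PORT B =====
-- text.split('.') ported by hand (exact for a non-empty one-character separator):
-- returns (first part, remaining parts), matching Source B's parts[0] / parts[1:].
def pvSplitDot : List Char → List Char × List (List Char)
  | [] => ([], [])
  | c :: cs =>
    let ht := pvSplitDot cs
    if c = '.' then ([], ht.1 :: ht.2) else (c :: ht.1, ht.2)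

-- Source B's loop over parts[1:]: rest.isEmpty ↔ k = last index
def pvAltGo : List (List Char) → List Char
  | [] => []
  | part :: rest =>
    let nxt : Option Char :=
      match part with
      | c :: _ => some c
      | [] => if rest.isEmpty then none else some '.'
    (match nxt with
     | some c => if c ≠ ' ' ∧ PySem.Chars.isdigit c = false then '.' :: ' ' :: part else '.' :: part
     | none => '.' :: part) ++ pvAltGo rest

def add_spaces_after_period_alt (text : String) : String :=
  let parts := pvSplitDot text.toList
  String.mk (parts.1 ++ pvAltGo parts.2)

-- ===== PRECONDITION & SPEC =====
def Spec_add_spaces_after_period (text : String) (out : String) : Prop := out = add_spaces_after_period_alt text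
instance (text : String) (out : String) : Decidable (Spec_add_spaces_after_period text out) := by unfold Spec_add_spaces_after_period; infer_instance

-- ===== CLAIM (what is proved, stated in full; the proofs are below) =====
def Claim_equal_add_spaces_after_period : Prop := ∀ (text : String), Dom_add_spaces_after_period text → Spec_add_spaces_after_period text (add_spaces_after_period text)

-- ===== LEMMAS AND PROOFS =====

-- common characterization: one pass with one-character lookahead
def pvFSpec : List Char → List Char
  | [] => []
  | c :: rest =>
    if c = '.' then
      match rest with
      | nxt :: _ =>
        if nxt ≠ ' ' ∧ PySem.Chars.isdigit nxt = false
        then '.' :: ' ' :: pvFSpec rest else '.' :: pvFSpec rest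
      | [] => '.' :: pvFSpec rest
    else c :: pvFSpec rest

lemma pvAGo : ∀ (suf pre acc : List Char),
    (PySem.List.enumerate suf (pre.length : Int)).foldl (pvABody (pre ++ suf)) acc
      = acc ++ pvFSpec suf := by
  intro suf
  induction suf with
  | nil => intro pre acc; simp [pvFSpec, PySem.List.enumerate_nil]
  | cons c suf ih =>
    intro pre acc
    rw [PySem.List.enumerate_cons, List.foldl_cons]
    have h1 : pre ++ c :: suf = (pre ++ [c]) ++ suf := by simp
    have h2 : (pre.length : Int) + 1 = ((pre ++ [c]).length : Int) := by
      simp [List.length_append]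
    rw [h1, h2, ih]
    have hget : PySem.List.pyGet? ((pre ++ [c]) ++ suf) (((pre ++ [c]).length : Int)) = suf.head? := by
      rw [PySem.List.pyGet?_natCast]
      rw [List.getElem?_append_right (by omega)]
      simp [List.head?_eq_getElem?]
    have hlen : (((pre ++ [c]) ++ suf).length : Int) = (pre.length : Int) + 1 + (suf.length : Int) := by
      simp [List.length_append]; omega
    by_cases hc : c = '.'
    · subst hc
      cases suf with
      | nil =>
        simp only [pvABody, pvFSpec, hlen]
        rw [if_pos trivial, if_neg (by rintro ⟨hlt, -, -⟩; simp at hlt)]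
        simp
      | cons nxt suf2 =>
        simp only [pvABody, pvFSpec, hlen]
        rw [← h2] at hget
        rw [if_pos trivial]
        by_cases hn : nxt ≠ ' ' ∧ PySem.Chars.isdigit nxt = false
        · rw [if_pos ?_, if_pos hn]
          · simp
          · refine ⟨by simp, Or.inr ?_, Or.inr ?_⟩
            · rw [hget]; simp [hn.1]
            · rw [hget]; simp [hn.2]
        · rw [if_neg ?_, if_neg hn]
          · simp
          · intro hcond
            rcases hcond with ⟨hlt, hsp, hdg⟩
            apply hn
            constructor
            · rcases hsp with hsp | hsp
              · exfalso; simp at hsp hlt; omega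
              · rw [hget] at hsp; simpa using hsp
            · rcases hdg with hdg | hdg
              · exfalso; simp at hdg hlt; omega
              · rw [hget] at hdg; simpa using hdg
    · simp only [pvABody, pvFSpec]
      rw [if_neg hc, if_neg hc]
      simp

lemma pvA_eq_fspec (text : String) :
    add_spaces_after_period text = String.mk (pvFSpec text.toList) := by
  have h := pvAGo text.toList [] []
  simp only [List.length_nil, Nat.cast_zero, List.nil_append] at h
  unfold add_spaces_after_period
  rw [h]

lemma pvSplitDot_head : ∀ (cs : List Char),
    (match (pvSplitDot cs).1 with
     | c :: _ => some c
     | [] => if (pvSplitDot cs).2.isEmpty then none else some '.') = cs.head? := by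
  intro cs
  cases cs with
  | nil => simp [pvSplitDot]
  | cons c cs =>
    by_cases hc : c = '.'
    · subst hc; simp [pvSplitDot]
    · simp [pvSplitDot, hc]

lemma pvB_eq_fspec_list : ∀ (cs : List Char),
    (pvSplitDot cs).1 ++ pvAltGo (pvSplitDot cs).2 = pvFSpec cs := by
  intro cs
  induction cs with
  | nil => simp [pvSplitDot, pvAltGo, pvFSpec]
  | cons c cs ih =>
    by_cases hc : c = '.'
    · subst hc
      have hh := pvSplitDot_head cs
      simp only [pvSplitDot, pvFSpec, if_true]
      rw [show pvAltGo ((pvSplitDot cs).1 :: (pvSplitDot cs).2)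
            = (match (match (pvSplitDot cs).1 with
                      | c :: _ => some c
                      | [] => if (pvSplitDot cs).2.isEmpty then none else some '.') with
               | some c => if c ≠ ' ' ∧ PySem.Chars.isdigit c = false
                           then '.' :: ' ' :: (pvSplitDot cs).1 else '.' :: (pvSplitDot cs).1
               | none => '.' :: (pvSplitDot cs).1) ++ pvAltGo (pvSplitDot cs).2 from rfl]
      rw [hh]
      cases cs with
      | nil => simp [pvAltGo, pvSplitDot, pvFSpec]
      | cons nxt cs2 =>
        simp only [List.head?_cons]
        by_cases hn : nxt ≠ ' ' ∧ PySem.Chars.isdigit nxt = false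
        · simp [hn, ih]
        · simp [hn, ih]
    · simp [pvSplitDot, hc, pvFSpec, ih]

-- ===== VERDICT (by name: the statement is the Claim_ definition above) =====
theorem add_spaces_after_period_spec : Claim_equal_add_spaces_after_period := by
  intro text _
  unfold Spec_add_spaces_after_period add_spaces_after_period_alt
  rw [pvA_eq_fspec, ← pvB_eq_fspec_list]
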